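-- pv_equiv track=rewrite | github.com/MrJumpingMarcello/AOC2024 | day14/day14-2.py | simulate_robot
-- ===== SOURCE A (Python) =====
-- def simulate_robot(p, v, steps=100):
--     x, y = p
--     vx, vy = v
--
--     # Simulate for each second
--     positions = []
--     for _ in range(steps):
--         x = (x + vx) % 101  # Wrap around the width of the map
--         y = (y + vy) % 103  # Wrap around the height of the map
--         positions.append((x, y))
--
--     return positions
-- ===== SOURCE B (Python) =====
-- def simulate_robot(p, v, steps=100):
--     x, y = p
--     vx, vy = v
--     return [((x + i * vx) % 101, (y + i * vy) % 103) for i in range(1, steps + 1)]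
-- ===== Notes on version B (the rewrite author's own statement) =====
-- stated objective: simpler
-- what changed: Replaces the stateful accumulation loop by a closed form: position after i steps is ((x + i*vx) % 101, (y + i*vy) % 103), computed independently per step index in a comprehension.
import Mathlib
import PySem

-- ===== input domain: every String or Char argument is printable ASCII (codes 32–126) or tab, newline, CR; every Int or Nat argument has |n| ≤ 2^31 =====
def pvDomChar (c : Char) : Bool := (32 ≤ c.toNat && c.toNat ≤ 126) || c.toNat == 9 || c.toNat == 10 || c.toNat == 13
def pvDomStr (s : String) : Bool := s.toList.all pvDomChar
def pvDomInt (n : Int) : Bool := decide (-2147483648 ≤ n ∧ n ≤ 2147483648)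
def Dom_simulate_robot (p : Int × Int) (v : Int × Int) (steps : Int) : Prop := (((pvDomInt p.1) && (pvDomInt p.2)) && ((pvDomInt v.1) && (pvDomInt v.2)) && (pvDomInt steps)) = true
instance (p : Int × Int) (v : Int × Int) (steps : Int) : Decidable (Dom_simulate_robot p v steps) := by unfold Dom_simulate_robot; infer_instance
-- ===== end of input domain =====

-- B replaces A's stateful accumulation by a per-step closed form ((x + i*vx) % 101, (y + i*vy) % 103); objective: simpler.

-- ===== PORT A =====
-- Literal port of A: a loop over range(steps) carrying (x, y, positions).
def simulate_robot (p : Int × Int) (v : Int × Int) (steps : Int) : List (Int × Int) :=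
  ((PySem.List.pyRange 0 steps 1).foldl
    (fun (st : Int × Int × List (Int × Int)) _ =>
      let x := PySem.Int.mod (st.1 + v.1) 101
      let y := PySem.Int.mod (st.2.1 + v.2) 103
      (x, y, st.2.2 ++ [(x, y)]))
    (p.1, p.2, [])).2.2

-- ===== PORT B =====
-- Literal port of B: a comprehension over range(1, steps+1) with the closed form.
def simulate_robot_alt (p : Int × Int) (v : Int × Int) (steps : Int) : List (Int × Int) :=
  (PySem.List.pyRange 1 (steps + 1) 1).map
    (fun i => (PySem.Int.mod (p.1 + i * v.1) 101, PySem.Int.mod (p.2 + i * v.2) 103))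

-- ===== PRECONDITION & SPEC =====
def Spec_simulate_robot (p : Int × Int) (v : Int × Int) (steps : Int) (out : List (Int × Int)) : Prop := out = simulate_robot_alt p v steps
instance (p : Int × Int) (v : Int × Int) (steps : Int) (out : List (Int × Int)) : Decidable (Spec_simulate_robot p v steps out) := by unfold Spec_simulate_robot; infer_instance

-- ===== CLAIM (what is proved, stated in full; the proofs are below) =====
def Claim_equal_simulate_robot : Prop := ∀ (p : Int × Int) (v : Int × Int) (steps : Int), Dom_simulate_robot p v steps → Spec_simulate_robot p v steps (simulate_robot p v steps)

-- ===== LEMMAS AND PROOFS =====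

-- A fold whose step ignores the list elements is iteration of the step, length many times.
theorem pv_foldl_ignore {α β : Type} (g : β → β) (l : List α) (init : β) :
    l.foldl (fun st _ => g st) init = g^[l.length] init := by
  induction l generalizing init with
  | nil => rfl
  | cons a t ih => simp [List.foldl_cons, ih, Function.iterate_succ_apply]

-- Reducing mod a positive divisor is idempotent.
theorem pv_mod_idem (a m : Int) (hm : (0:Int) < m) :
    PySem.Int.mod (PySem.Int.mod a m) m = PySem.Int.mod a m := by
  rw [PySem.Int.mod_eq_emod_of_pos hm, PySem.Int.mod_eq_emod_of_pos hm, Int.emod_emod_of_dvd _ dvd_rfl]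

-- Stepping modulo a positive divisor: reducing first does not change the result.
theorem pv_mod_step (a b m : Int) (hm : (0:Int) < m) :
    PySem.Int.mod (PySem.Int.mod a m + b) m = PySem.Int.mod (a + b) m := by
  rw [PySem.Int.mod_eq_emod_of_pos hm, PySem.Int.mod_eq_emod_of_pos hm,
      PySem.Int.mod_eq_emod_of_pos hm, Int.emod_add_emod]

-- Loop invariant: after n iterations the state agrees (mod 101/103) with the closed
-- form at index n, and the accumulated list is the closed-form values at 1..n.
theorem pv_loop_inv (p v : Int × Int) (n : Nat) :
    PySem.Int.mod (((fun (st : Int × Int × List (Int × Int)) =>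
        let x := PySem.Int.mod (st.1 + v.1) 101
        let y := PySem.Int.mod (st.2.1 + v.2) 103
        (x, y, st.2.2 ++ [(x, y)]))^[n] (p.1, p.2, [])).1) 101
      = PySem.Int.mod (p.1 + (n : Int) * v.1) 101 ∧
    PySem.Int.mod (((fun (st : Int × Int × List (Int × Int)) =>
        let x := PySem.Int.mod (st.1 + v.1) 101
        let y := PySem.Int.mod (st.2.1 + v.2) 103
        (x, y, st.2.2 ++ [(x, y)]))^[n] (p.1, p.2, [])).2.1) 103
      = PySem.Int.mod (p.2 + (n : Int) * v.2) 103 ∧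
    ((fun (st : Int × Int × List (Int × Int)) =>
        let x := PySem.Int.mod (st.1 + v.1) 101
        let y := PySem.Int.mod (st.2.1 + v.2) 103
        (x, y, st.2.2 ++ [(x, y)]))^[n] (p.1, p.2, [])).2.2
      = (PySem.List.pyRange 1 ((n : Int) + 1) 1).map
          (fun i => (PySem.Int.mod (p.1 + i * v.1) 101, PySem.Int.mod (p.2 + i * v.2) 103)) := by
  induction n with
  | zero => simp [PySem.List.pyRange_one_eq_nil]
  | succ k ih =>
      obtain ⟨ih1, ih2, ih3⟩ := ih
      rw [Function.iterate_succ_apply']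
      have h1 : ((k + 1 : Nat) : Int) = (k : Int) + 1 := by push_cast; ring
      have hx : PySem.Int.mod (((fun (st : Int × Int × List (Int × Int)) =>
          let x := PySem.Int.mod (st.1 + v.1) 101
          let y := PySem.Int.mod (st.2.1 + v.2) 103
          (x, y, st.2.2 ++ [(x, y)]))^[k] (p.1, p.2, [])).1 + v.1) 101
          = PySem.Int.mod (p.1 + ((k:Int) + 1) * v.1) 101 := by
        rw [← pv_mod_step _ _ _ (by norm_num), ih1, pv_mod_step _ _ _ (by norm_num)]
        ring_nf
      have hy : PySem.Int.mod (((fun (st : Int × Int × List (Int × Int)) =>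
          let x := PySem.Int.mod (st.1 + v.1) 101
          let y := PySem.Int.mod (st.2.1 + v.2) 103
          (x, y, st.2.2 ++ [(x, y)]))^[k] (p.1, p.2, [])).2.1 + v.2) 103
          = PySem.Int.mod (p.2 + ((k:Int) + 1) * v.2) 103 := by
        rw [← pv_mod_step _ _ _ (by norm_num), ih2, pv_mod_step _ _ _ (by norm_num)]
        ring_nf
      refine ⟨?_, ?_, ?_⟩
      · simp only [h1]
        rw [pv_mod_idem _ 101 (by norm_num), hx]
      · simp only [h1]
        rw [pv_mod_idem _ 103 (by norm_num), hy]
      · simp only [h1, ih3, hx, hy,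
          PySem.List.pyRange_one_succ_right (by omega : (1:Int) ≤ (k:Int) + 1),
          List.map_append, List.map_cons, List.map_nil]

-- ===== VERDICT (by name: the statement is the Claim_ definition above) =====
theorem simulate_robot_spec : Claim_equal_simulate_robot := by
  intro p v steps _
  unfold Spec_simulate_robot simulate_robot simulate_robot_alt
  by_cases h : steps ≤ 0
  · rw [PySem.List.pyRange_one_eq_nil h, PySem.List.pyRange_one_eq_nil (by omega)]
    rfl
  · have hn : steps = ((steps.toNat : Nat) : Int) := by omega
    rw [hn, pv_foldl_ignore]
    have hl : (PySem.List.pyRange 0 ((steps.toNat : Nat) : Int) 1).length = steps.toNat := by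
      rw [PySem.List.length_pyRange_one]; omega
    rw [hl]
    exact (pv_loop_inv p v steps.toNat).2.2
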